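-- pv_equiv track=rewrite | github.com/babyChou/anita_ncku_homework | g-lsb/main.py | float_bin
-- ===== SOURCE A (Python) =====
-- def float_bin(number, places = 160):
--     n = str(number)
--     num_len = len(n)
--     prefix_zero = ''
--     res = ''
--
--     for x in range(places):
--         n = str(int(n) * 2)
--
--         if prefix_zero != '':
--             n += prefix_zero
--             prefix_zero = ''
--
--         if len(n) <= num_len:
--             res += '0'
--         else:
--             res += n[0]
--             n = n[1:]
--
--         ck_len = len(str(int(n))) - len(n)
--
--         if ck_len > 0:
--             prefix_zero = ''.join(['0' for v in range(0, ck_len)])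
--
--     return res
-- ===== SOURCE B (Python) =====
-- def float_bin(number, places = 160):
--     if number < 0:
--         raise ValueError("number must be a non-negative integer")
--     m = 10 ** len(str(number))
--     v = number
--     bits = []
--     for _ in range(places):
--         v *= 2
--         if v >= m:
--             bits.append('1')
--             v -= m
--         else:
--             bits.append('0')
--     return ''.join(bits)
-- ===== Notes on version B (the rewrite author's own statement) =====
-- stated objective: faster
-- what changed: B keeps the fraction as a plain integer v and emits each bit with one doubling plus one compare/subtract against m = 10**len(str(number)), removing A's per-step str->int->str round-trips, string slicing and leading-zero bookkeeping; negative inputs (where A weaves a '-' into the bit string) are excluded by Pre_ and make B raise ValueError.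
-- outside the precondition, e.g. on float_bin(-2, 10): A returns '00-0010100', B raises ValueError; on float_bin(-5, 10): A returns '-000110011', B raises ValueError
import Mathlib
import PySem

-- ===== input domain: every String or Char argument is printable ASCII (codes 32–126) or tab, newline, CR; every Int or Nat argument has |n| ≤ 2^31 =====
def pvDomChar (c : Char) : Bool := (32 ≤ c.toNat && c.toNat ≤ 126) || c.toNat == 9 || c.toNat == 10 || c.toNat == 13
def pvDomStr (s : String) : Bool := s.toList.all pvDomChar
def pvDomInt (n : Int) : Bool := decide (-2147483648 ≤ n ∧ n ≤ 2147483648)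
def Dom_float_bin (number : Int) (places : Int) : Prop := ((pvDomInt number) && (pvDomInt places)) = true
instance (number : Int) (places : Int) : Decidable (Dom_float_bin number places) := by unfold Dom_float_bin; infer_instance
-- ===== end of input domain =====

-- B re-implements A with pure integer arithmetic (one compare/subtract per bit instead of
-- str->int->str round-trips); measured faster; negative inputs are excluded by Pre_ (B raises there).

-- ===== PORT A =====
-- Python's int(s) hand-ported for this program: exact on every string A ever passes to int() —
-- outputs of str(k) (optional leading '-', then digits) and nonempty all-digit slices of them.
-- (PySem.Int.ofStr? additionally handles whitespace/'+'/underscores, which never occur here.)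
def pvDigitsVal (cs : List Char) : Int := cs.foldl (fun a c => 10 * a + ((c.toNat : Int) - 48)) 0

def pvIntVal (s : String) : Int :=
  if s.toList.head? = some '-' then - pvDigitsVal s.toList.tail else pvDigitsVal s.toList

-- one iteration of A's "for x in range(places)" body; state = (n, prefix_zero, res)
def pvStepA (numLen : Int) (st : String × String × String) : String × String × String :=
  -- n = str(int(n) * 2)
  let n0 := PySem.Int.toStr (pvIntVal st.1 * 2)
  -- if prefix_zero != '': n += prefix_zero; prefix_zero = ''
  let n1 := if st.2.1 ≠ "" then n0 ++ st.2.1 else n0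
  let pz1 : String := if st.2.1 ≠ "" then "" else st.2.1
  -- if len(n) <= num_len: res += '0'  else: res += n[0]; n = n[1:]
  let res1 := if PySem.Str.len n1 ≤ numLen then st.2.2 ++ "0"
    else st.2.2 ++ (match PySem.Str.pyGet? n1 0 with | some c => String.ofList [c] | none => "")
  let n2 := if PySem.Str.len n1 ≤ numLen then n1 else PySem.Str.slice n1 (some 1) none
  -- ck_len = len(str(int(n))) - len(n); if ck_len > 0: prefix_zero = ''.join(['0' for v in range(0, ck_len)])
  let ck := PySem.Str.len (PySem.Int.toStr (pvIntVal n2)) - PySem.Str.len n2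
  let pz2 := if ck > 0 then PySem.Str.join "" ((PySem.List.pyRange 0 ck 1).map fun _x => "0") else pz1
  (n2, pz2, res1)

def float_bin (number : Int) (places : Int) : String :=
  -- n = str(number); num_len = len(n); prefix_zero = ''; res = ''; loop; return res
  ((PySem.List.pyRange 0 places 1).foldl
      (fun st _x => pvStepA (PySem.Str.len (PySem.Int.toStr number)) st)
      (PySem.Int.toStr number, "", "")).2.2

-- ===== PORT B =====
-- one iteration of B's loop body; state = (v, bits)
def pvStepB (m : Int) (st : Int × List Char) : Int × List Char :=
  let v := st.1 * 2
  if m ≤ v then (v - m, st.2 ++ ['1']) else (v, st.2 ++ ['0'])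

def float_bin_alt (number : Int) (places : Int) : String :=
  -- m = 10 ** len(str(number)); v = number; bits = []; loop; return ''.join(bits)
  String.ofList
    (((PySem.List.pyRange 0 places 1).foldl
        (fun st _x => pvStepB ((10 : Int) ^ (PySem.Str.len (PySem.Int.toStr number)).toNat) st)
        (number, ([] : List Char))).2)

-- ===== PRECONDITION & SPEC =====
-- Pre_ excludes negative numbers, on which A weaves a '-' character into the returned bit
-- string (an artefact of doubling the signed decimal string) and B instead raises ValueError.
def Pre_float_bin (number : Int) (places : Int) : Prop := 0 ≤ number

instance (number : Int) (places : Int) : Decidable (Pre_float_bin number places) := by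
  unfold Pre_float_bin; infer_instance

def pvWitness_float_bin : Int × Int := (5, 8)

def Spec_float_bin (number : Int) (places : Int) (out : String) : Prop := out = float_bin_alt number places
instance (number : Int) (places : Int) (out : String) : Decidable (Spec_float_bin number places out) := by
  unfold Spec_float_bin; infer_instance

-- ===== CLAIM (what is proved, stated in full; the proofs are below) =====
def Claim_equal_float_bin : Prop := ∀ (number : Int) (places : Int), Dom_float_bin number places → Pre_float_bin number places → Spec_float_bin number places (float_bin number places)

-- ===== LEMMAS AND PROOFS =====

-- (digitChar d) for d < 10 is the char of code d + 48
theorem pv_digitChar_toNat {d : ℕ} (h : d < 10) : (Nat.digitChar d).toNat = d + 48 := by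
  interval_cases d <;> rfl

-- pvDigitsVal inverts Nat.toDigits 10
theorem pvDigitsVal_toDigits (w : ℕ) : pvDigitsVal (Nat.toDigits 10 w) = w := by
  induction w using Nat.strong_induction_on with
  | _ w ih =>
    by_cases h : w < 10
    · rw [Nat.toDigits_of_lt_base h]
      simp [pvDigitsVal, pv_digitChar_toNat h]
    · rw [Nat.toDigits_of_base_le (by norm_num) (le_of_not_gt h)]
      have h10 : w % 10 < 10 := Nat.mod_lt _ (by norm_num)
      have hdiv : w / 10 < w := Nat.div_lt_self (by omega) (by norm_num)
      simp only [pvDigitsVal, List.foldl_append, List.foldl_cons, List.foldl_nil]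
      have := ih (w / 10) hdiv
      simp only [pvDigitsVal] at this
      rw [this, pv_digitChar_toNat h10]
      push_cast
      omega

theorem pvDigitsVal_replicate (z : ℕ) (ds : List Char) :
    pvDigitsVal (List.replicate z '0' ++ ds) = pvDigitsVal ds := by
  induction z with
  | zero => simp
  | succ z ih =>
    simpa [pvDigitsVal, List.replicate_succ] using ih

-- every char of toDigits 10 w is a digit, so ≠ '-'
theorem pv_toDigits_ne_dash {w : ℕ} {c : Char} (h : c ∈ Nat.toDigits 10 w) : c ≠ '-' := by
  have := Nat.isDigit_of_mem_toDigits (by norm_num) (by norm_num) h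
  intro hc; subst hc; simp [Char.isDigit] at this

theorem pv_toDigits_ne_nil (w : ℕ) : Nat.toDigits 10 w ≠ [] :=
  List.ne_nil_of_length_pos Nat.length_toDigits_pos

-- pvIntVal on a zero-padded canonical digit string
theorem pvIntVal_padded (z w : ℕ) :
    pvIntVal (String.ofList (List.replicate z '0' ++ Nat.toDigits 10 w)) = (w : Int) := by
  have hval : pvDigitsVal (List.replicate z '0' ++ Nat.toDigits 10 w) = (w : Int) := by
    rw [pvDigitsVal_replicate, pvDigitsVal_toDigits]
  unfold pvIntVal
  cases z with
  | zero =>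
    obtain ⟨c, t, hct⟩ := List.exists_cons_of_ne_nil (pv_toDigits_ne_nil w)
    have hc : c ≠ '-' := pv_toDigits_ne_dash (by rw [hct]; exact List.mem_cons_self ..)
    simp only [List.replicate, List.nil_append] at hval ⊢
    rw [hct] at hval ⊢
    simp [hc, hval]
  | succ z =>
    simp only [List.replicate_succ, List.cons_append] at hval ⊢
    simp [hval]

-- toStr of a natural number
theorem pv_toStr_natCast (n : ℕ) :
    PySem.Int.toStr ((n : ℕ) : Int) = String.ofList (Nat.toDigits 10 n) := by
  simp only [PySem.Int.toStr, PySem.Int.toChars]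
  rw [if_neg (by omega)]
  simp

-- decimal digit-string of 10^L + r (r < 10^L): a '1', padding zeros, then the digits of r
theorem pv_toDigits_lead_one :
    ∀ (L : ℕ), 0 < L → ∀ (r : ℕ), r < 10 ^ L →
      Nat.toDigits 10 (10 ^ L + r)
        = '1' :: (List.replicate (L - (Nat.toDigits 10 r).length) '0' ++ Nat.toDigits 10 r) := by
  intro L
  induction L with
  | zero => omega
  | succ L ih =>
    intro _ r hr
    have hpow : 10 ^ (L + 1) = 10 * 10 ^ L := by ring
    rcases Nat.eq_zero_or_pos L with hL0 | hLpos
    · subst hL0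
      have hr10 : r < 10 := by simpa using hr
      rw [show 10 ^ (0 + 1) + r = 10 + r by norm_num,
          Nat.toDigits_of_base_le (by norm_num) (by omega),
          show (10 + r) / 10 = 1 by omega, show (10 + r) % 10 = r by omega,
          Nat.toDigits_of_lt_base (by norm_num : (1 : ℕ) < 10),
          Nat.toDigits_of_lt_base hr10]
      simp
      rfl
    · have hbig : 10 ≤ 10 ^ (L + 1) + r := by
        have h1 : 10 ^ 1 ≤ 10 ^ (L + 1) := Nat.pow_le_pow_right (by norm_num) (by omega)
        simp at h1; omega
      rw [Nat.toDigits_of_base_le (by norm_num) hbig,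
          show (10 ^ (L + 1) + r) / 10 = 10 ^ L + r / 10 by rw [hpow]; omega,
          show (10 ^ (L + 1) + r) % 10 = r % 10 by rw [hpow]; omega,
          ih hLpos (r / 10) (by have h2 := hr; rw [hpow] at h2; omega)]
      by_cases hrlt : r < 10
      · rw [show r / 10 = 0 by omega, show r % 10 = r by omega, Nat.toDigits_zero,
            Nat.toDigits_of_lt_base hrlt]
        have hrep : List.replicate (L - 1) '0' ++ ['0'] = List.replicate L '0' := by
          rw [← List.replicate_succ']
          congr 1
          omega
        simp only [List.length_cons, List.length_nil, List.cons_append, List.nil_append,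
          List.append_assoc, Nat.add_sub_cancel]
        rw [show ('0' : Char) :: [Nat.digitChar r] = ['0'] ++ [Nat.digitChar r] from rfl,
            ← List.append_assoc, hrep]
      · have hsplit : Nat.toDigits 10 r = Nat.toDigits 10 (r / 10) ++ [Nat.digitChar (r % 10)] :=
          Nat.toDigits_of_base_le (by norm_num) (le_of_not_gt hrlt)
        rw [hsplit]
        simp only [List.length_append, List.length_singleton, List.cons_append, List.append_assoc]
        congr 3
        omega

-- length of toDigits vs a power bound
theorem pv_len_toDigits_le_iff {L w : ℕ} (hL : 0 < L) :
    (Nat.toDigits 10 w).length ≤ L ↔ w < 10 ^ L :=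
  Nat.length_toDigits_le_iff (by norm_num) hL

-- one synchronised step of the two loops
theorem pv_step_sync (L : ℕ) (hL : 0 < L) (w : ℕ) (hw : w < 10 ^ L)
    (z : ℕ) (resA : String) (bits : List Char) (hres : resA.toList = bits) :
    ∃ (w' : ℕ) (z' : ℕ) (bit : Char),
      w' < 10 ^ L ∧
      pvStepA (L : Int) (String.ofList (List.replicate z '0' ++ Nat.toDigits 10 w), "", resA)
        = (String.ofList (List.replicate z' '0' ++ Nat.toDigits 10 w'), "",
           String.ofList (bits ++ [bit])) ∧
      pvStepB ((10 : Int) ^ L) ((w : Int), bits) = ((w' : Int), bits ++ [bit]) := by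
  have hresA : resA = String.ofList bits := by rw [← hres]; simp
  subst hresA
  have hcat : ∀ (l : List Char) (c : Char),
      String.ofList l ++ String.ofList [c] = String.ofList (l ++ [c]) := by
    intro l c; simp
  have h0s : ("0" : String) = String.ofList ['0'] := by decide
  have hIntn : pvIntVal (String.ofList (List.replicate z '0' ++ Nat.toDigits 10 w)) * 2
      = ((2 * w : ℕ) : Int) := by
    rw [pvIntVal_padded]; push_cast; ring
  have hpad0 : ∀ u : ℕ, pvIntVal (String.ofList (Nat.toDigits 10 u)) = (u : Int) := by
    intro u; simpa using pvIntVal_padded 0 u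
  have hlenu : PySem.Str.len (String.ofList (Nat.toDigits 10 (2 * w)))
      = ((Nat.toDigits 10 (2 * w)).length : Int) := by
    simp [PySem.Str.len_eq]
  by_cases hcase : 2 * w < 10 ^ L
  · -- bit '0': the doubled value still has at most L digits
    refine ⟨2 * w, 0, '0', hcase, ?_, ?_⟩
    · have hcond : PySem.Str.len (String.ofList (Nat.toDigits 10 (2 * w))) ≤ (L : Int) := by
        rw [hlenu]
        exact_mod_cast (pv_len_toDigits_le_iff hL).mpr hcase
      unfold pvStepA
      simp only [hIntn, pv_toStr_natCast, ne_eq, not_true_eq_false, if_false]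
      rw [if_pos hcond, if_pos hcond, hpad0 (2 * w), pv_toStr_natCast, h0s, hcat]
      simp only [sub_self, gt_iff_lt, lt_irrefl, if_false]
      simp
    · unfold pvStepB
      have hm10 : ((10 : Int)) ^ L = ((10 ^ L : ℕ) : Int) := by push_cast; ring
      rw [if_neg (by rw [hm10]; omega)]
      push_cast
      rw [mul_comm]
  · -- bit '1': the doubled value has L+1 digits, its head is '1'
    set r := 2 * w - 10 ^ L with hrdef
    have h2w : 2 * w = 10 ^ L + r := by omega
    have hrlt : r < 10 ^ L := by omega
    have hlead : Nat.toDigits 10 (2 * w)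
        = '1' :: (List.replicate (L - (Nat.toDigits 10 r).length) '0' ++ Nat.toDigits 10 r) := by
      rw [h2w]; exact pv_toDigits_lead_one L hL r hrlt
    have hlenr : (Nat.toDigits 10 r).length ≤ L := (pv_len_toDigits_le_iff hL).mpr hrlt
    have hlen2 : (Nat.toDigits 10 (2 * w)).length = L + 1 := by
      rw [hlead]; simp; omega
    refine ⟨r, L - (Nat.toDigits 10 r).length, '1', hrlt, ?_, ?_⟩
    · have hcond : ¬ PySem.Str.len (String.ofList (Nat.toDigits 10 (2 * w))) ≤ (L : Int) := by
        rw [hlenu, hlen2]; exact_mod_cast by omega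
      have hget1 : PySem.Str.pyGet? (String.ofList (Nat.toDigits 10 (2 * w))) 0 = some '1' := by
        rw [PySem.Str.pyGet?_eq]
        simp only [String.toList_ofList, PySem.Chars.pyGet?_eq_listPyGet?, PySem.List.pyGet?_zero]
        rw [hlead]
        rfl
      have hslice : PySem.Str.slice (String.ofList (Nat.toDigits 10 (2 * w))) (some 1) none
          = String.ofList (List.replicate (L - (Nat.toDigits 10 r).length) '0'
              ++ Nat.toDigits 10 r) := by
        have ht : (PySem.Str.slice (String.ofList (Nat.toDigits 10 (2 * w))) (some 1) none).toList
            = List.replicate (L - (Nat.toDigits 10 r).length) '0' ++ Nat.toDigits 10 r := by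
          rw [PySem.Str.toList_slice]
          simp only [String.toList_ofList, PySem.Chars.slice_eq_listSlice,
            PySem.List.slice_some_none]
          rw [show PySem.List.clampIdx (Nat.toDigits 10 (2 * w)).length 1 = 1 by
            simp [PySem.List.clampIdx]; omega]
          rw [hlead]
          rfl
        calc PySem.Str.slice (String.ofList (Nat.toDigits 10 (2 * w))) (some 1) none
            = String.ofList ((PySem.Str.slice (String.ofList
                (Nat.toDigits 10 (2 * w))) (some 1) none).toList) := String.ofList_toList.symm
          _ = _ := by rw [ht]
      have hcknum : pvIntVal (String.ofList (List.replicate (L - (Nat.toDigits 10 r).length) '0'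
          ++ Nat.toDigits 10 r)) = (r : Int) := pvIntVal_padded _ r
      have hcklen : PySem.Str.len (String.ofList (List.replicate
          (L - (Nat.toDigits 10 r).length) '0' ++ Nat.toDigits 10 r)) = (L : Int) := by
        simp only [PySem.Str.len_eq, String.toList_ofList, List.length_append,
          List.length_replicate]
        exact_mod_cast by omega
      have hckr : PySem.Str.len (PySem.Int.toStr (r : Int))
          = ((Nat.toDigits 10 r).length : Int) := by
        rw [pv_toStr_natCast]; simp [PySem.Str.len_eq]
      unfold pvStepA
      simp only [hIntn, pv_toStr_natCast, ne_eq, not_true_eq_false, if_false]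
      rw [if_neg hcond, if_neg hcond, hget1, hslice, hcknum, hckr, hcklen]
      rw [if_neg (by omega), hcat]
    · unfold pvStepB
      have hm10 : ((10 : Int)) ^ L = ((10 ^ L : ℕ) : Int) := by push_cast; ring
      rw [if_pos (by rw [hm10]; omega)]
      have : (w : Int) * 2 - (10 : Int) ^ L = (r : Int) := by rw [hm10]; omega
      rw [this]

-- the two folds stay synchronised over any index list
theorem pv_fold_sync (L : ℕ) (hL : 0 < L) (l : List Int) :
    ∀ (w : ℕ) (z : ℕ) (resA : String) (bits : List Char), w < 10 ^ L → resA.toList = bits →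
      ((l.foldl (fun st _x => pvStepA (L : Int) st)
          (String.ofList (List.replicate z '0' ++ Nat.toDigits 10 w), "", resA)).2.2.toList
        = (l.foldl (fun st _x => pvStepB ((10 : Int) ^ L) st) ((w : Int), bits)).2) := by
  induction l with
  | nil => intro w z resA bits hw hres; simpa using hres
  | cons hd tl ih =>
    intro w z resA bits hw hres
    obtain ⟨w', z', bit, hw', hA, hB⟩ := pv_step_sync L hL w hw z resA bits hres
    simp only [List.foldl_cons, hA, hB]
    exact ih w' z' _ (bits ++ [bit]) hw' (by simp)

-- ===== VERDICT (by name: the statement is the Claim_ definition above) =====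
theorem float_bin_spec : Claim_equal_float_bin := by
  intro number places _hdom hpre
  unfold Spec_float_bin float_bin float_bin_alt
  have hnum : ((number.toNat : ℕ) : Int) = number := Int.toNat_of_nonneg hpre
  set N := number.toNat with hN
  set L := (Nat.toDigits 10 N).length with hLdef
  have hL : 0 < L := Nat.length_toDigits_pos
  have htoStr : PySem.Int.toStr number = String.ofList (Nat.toDigits 10 N) := by
    rw [← hnum]; exact pv_toStr_natCast N
  have hlen : PySem.Str.len (PySem.Int.toStr number) = (L : Int) := by
    rw [htoStr]; simp only [PySem.Str.len_eq, String.toList_ofList]; rw [← hLdef]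
  have hwlt : N < 10 ^ L := (pv_len_toDigits_le_iff hL).mp (by omega)
  have hm : ((PySem.Str.len (PySem.Int.toStr number)).toNat) = L := by
    rw [hlen]; simp
  have h10 : ((10 : Int)) ^ ((PySem.Str.len (PySem.Int.toStr number)).toNat) = (10 : Int) ^ L := by
    rw [hm]
  have hfold := pv_fold_sync L hL (PySem.List.pyRange 0 places 1) N 0 "" [] hwlt (by rfl)
  simp only [List.replicate, List.nil_append] at hfold
  rw [h10, hlen, htoStr, ← hnum]
  rw [← hfold]
  simp
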